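-- pv_equiv track=rewrite | github.com/infoshareacademy/pydqz1-fatal_error | php_travels/helpers/generators.py | even_letters
-- ===== SOURCE A (Python) =====
-- def even_letters(before_even):
--     """Funkcja do edycji napisu"""
--     new_string_list = []
--     a = 2
--     for letters in before_even:
--         if a % 2 == 0:
--             new_string_list.append(letters)
--         a += 1
--     new_string_str = "".join(new_string_list)
--     return new_string_str
-- ===== SOURCE B (Python) =====
-- def even_letters(before_even):
--     """Funkcja do edycji napisu"""
--     return "".join(before_even[::2])
-- ===== Notes on version B (the rewrite author's own statement) =====
-- stated objective: idiomatic
-- what changed: Replaces the counter-and-parity filter loop that appends into a list with a single stride slice [::2] selecting the even indices directly, joined into the result.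
import Mathlib
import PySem

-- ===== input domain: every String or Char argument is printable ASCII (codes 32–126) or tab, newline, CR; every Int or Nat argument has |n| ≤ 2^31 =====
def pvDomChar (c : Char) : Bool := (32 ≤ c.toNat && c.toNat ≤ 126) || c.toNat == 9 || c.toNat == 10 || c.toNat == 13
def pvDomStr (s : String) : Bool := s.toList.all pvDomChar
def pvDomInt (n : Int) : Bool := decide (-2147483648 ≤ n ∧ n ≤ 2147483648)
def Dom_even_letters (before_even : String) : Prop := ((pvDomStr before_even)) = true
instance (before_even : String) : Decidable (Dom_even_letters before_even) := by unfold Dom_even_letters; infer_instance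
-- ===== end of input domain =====

-- B replaces A's counter-and-parity append loop with a stride slice [::2] (idiomatic, same cost).

-- ===== PORT A =====
-- counter a starts at 2; a char is appended when the counter is even
def even_letters (before_even : String) : String :=
  let r := before_even.toList.foldl
    (fun (st : List Char × Int) letters =>
      ((if PySem.Int.mod st.2 2 == 0 then st.1 ++ [letters] else st.1), st.2 + 1))
    ([], 2)
  String.ofList r.1   -- "".join(new_string_list)

-- ===== PORT B =====
-- before_even[::2]; step 2 ≠ 0 so slice? is always `some`, and "".join over a string's
-- characters is that string itself
def even_letters_alt (before_even : String) : String :=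
  (PySem.Str.slice? before_even none none 2).getD ""

-- ===== PRECONDITION & SPEC =====
def Spec_even_letters (before_even : String) (out : String) : Prop := out = even_letters_alt before_even
instance (before_even : String) (out : String) : Decidable (Spec_even_letters before_even out) := by unfold Spec_even_letters; infer_instance

-- ===== CLAIM (what is proved, stated in full; the proofs are below) =====
def Claim_equal_even_letters : Prop := ∀ (before_even : String), Dom_even_letters before_even → Spec_even_letters before_even (even_letters before_even)

-- ===== LEMMAS AND PROOFS =====

-- the characters at even indices, taken two at a time
def everyOtherL : List Char → List Char
  | [] => []
  | [c] => [c]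
  | c :: _ :: rest => c :: everyOtherL rest

-- the filterMap-over-range that slice? with step 2 produces is exactly everyOtherL
theorem fm_spec (xs : List Char) :
    List.filterMap (fun (k : Nat) => xs[((0 : Int) + 2 * (k : Int)).toNat]?)
      (List.range ((((xs.length : Int) - 0 + 2 - 1) / 2).toNat)) = everyOtherL xs := by
  induction xs using everyOtherL.induct with
  | case1 => simp [everyOtherL]
  | case2 c =>
    have h1 : (((([c] : List Char).length : Int)) - 0 + 2 - 1) / 2 = 1 := by simp
    rw [h1]
    simp [everyOtherL]
  | case3 c d rest ih =>
    have hcnt : ((((c :: d :: rest).length : Int) - 0 + 2 - 1) / 2).toNat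
        = (((rest.length : Int) - 0 + 2 - 1) / 2).toNat + 1 := by
      simp only [List.length_cons]; push_cast; omega
    rw [hcnt, List.range_succ_eq_map, List.filterMap_cons, List.filterMap_map]
    have h0 : (c :: d :: rest)[((0 : Int) + 2 * ((0 : Nat) : Int)).toNat]? = some c := by
      norm_num
    rw [h0]
    have hfun : ((fun (k : Nat) => (c :: d :: rest)[((0 : Int) + 2 * (k : Int)).toNat]?) ∘ Nat.succ)
        = fun (k : Nat) => rest[((0 : Int) + 2 * (k : Int)).toNat]? := by
      funext k
      have hidx : (((0 : Int) + 2 * ((Nat.succ k : Nat) : Int)).toNat)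
          = (((0 : Int) + 2 * ((k : Nat) : Int)).toNat) + 2 := by push_cast; omega
      simp only [Function.comp_apply, hidx]
      simp
    rw [hfun, ih]
    rfl

theorem slice2 (xs : List Char) :
    PySem.List.slice? xs none none 2 = some (everyOtherL xs) := by
  rw [← fm_spec xs]
  simp only [PySem.List.slice?, PySem.List.sliceIndices]
  norm_num
  rcases Nat.eq_zero_or_pos xs.length with h | h
  · simp [h]
  · rw [if_pos (by exact_mod_cast h)]

-- A's loop keeps the chars at even positions when the counter starts even, odd positions otherwise
theorem fold_spec (xs : List Char) : ∀ (acc : List Char) (a : Int),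
    (xs.foldl (fun (st : List Char × Int) letters =>
      ((if PySem.Int.mod st.2 2 == 0 then st.1 ++ [letters] else st.1), st.2 + 1)) (acc, a)).1
    = acc ++ (if PySem.Int.mod a 2 == 0 then everyOtherL xs else everyOtherL xs.tail) := by
  induction xs with
  | nil => intro acc a; simp [everyOtherL]
  | cons c rest ih =>
    intro acc a
    have hm : PySem.Int.mod a 2 = a % 2 := PySem.Int.mod_eq_emod_of_pos (by omega)
    have hm1 : PySem.Int.mod (a + 1) 2 = (a + 1) % 2 := PySem.Int.mod_eq_emod_of_pos (by omega)
    by_cases h : a % 2 = 0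
    · have hc : (PySem.Int.mod a 2 == 0) = true := by rw [hm, h]; decide
      have hc1 : (PySem.Int.mod (a + 1) 2 == 0) = false := by
        rw [hm1, show (a + 1) % 2 = 1 by omega]; decide
      rw [List.foldl_cons]
      simp only [hc, if_true]
      rw [ih]
      simp only [hc1, Bool.false_eq_true, if_false]
      cases rest with
      | nil => simp [everyOtherL]
      | cons d r2 => simp [everyOtherL]
    · have hc : (PySem.Int.mod a 2 == 0) = false := by
        rw [hm, show a % 2 = 1 by omega]; decide
      have hc1 : (PySem.Int.mod (a + 1) 2 == 0) = true := by
        rw [hm1, show (a + 1) % 2 = 0 by omega]; decide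
      rw [List.foldl_cons]
      simp only [hc, Bool.false_eq_true, if_false]
      rw [ih]
      simp only [hc1, if_true]
      simp

-- ===== VERDICT (by name: the statement is the Claim_ definition above) =====
theorem even_letters_spec : Claim_equal_even_letters := by
  intro s _
  unfold Spec_even_letters even_letters even_letters_alt
  simp only [PySem.Str.slice?, PySem.Chars.slice?_eq_listSlice?, slice2, Option.map_some,
    Option.getD_some]
  rw [fold_spec]
  norm_num [PySem.Int.mod]
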